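-- pv_equiv track=rewrite | github.com/wzygxr/shuati | class062_GCDCalculationAndLCM/AdditionalGcdLcmProblems.py | lcm_sum
-- ===== SOURCE A (Python) =====
-- def lcm_sum(n: int) -> int:
--     """
--     SPOJ LCMSUM. LCM Sum
--     题目来源：https://www.spoj.com/problems/LCMSUM/
--     问题描述：给定n，计算∑(i=1 to n) lcm(i, n)
--     解题思路：利用数学公式进行优化。我们知道：
--              ∑(i=1 to n) lcm(i, n) = ∑(i=1 to n) (i * n) / gcd(i, n)
--              = n * ∑(i=1 to n) i / gcd(i, n)
--
--              我们可以将这个和式按gcd值分组：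
--              ∑(d|n) ∑(i=1 to n, gcd(i,n)=d) i / d
--
--              对于gcd(i,n)=d的情况，设i=d*j, n=d*k，则gcd(j,k)=1
--              所以∑(i=1 to n, gcd(i,n)=d) i = d * ∑(j=1 to k, gcd(j,k)=1) j
--
--              ∑(j=1 to k, gcd(j,k)=1) j = k * φ(k) / 2 (当k>1时)
--              其中φ是欧拉函数
--
--              因此，∑(i=1 to n) lcm(i, n) = n * ∑(d|n) φ(n/d) * (n/d) / 2
--              = (n/2) * ∑(d|n) φ(d) * d + n (当d=n时需要特殊处理)
--     时间复杂度：O(√n)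
--     空间复杂度：O(1)
--     是否最优解：是，这是解决该问题的最优方法。
--     """
--     # 预处理欧拉函数
--     phi = list(range(n + 1))
--
--     i = 2
--     while i <= n:
--         if phi[i] == i:  # i是质数
--             j = i
--             while j <= n:
--                 phi[j] = phi[j] // i * (i - 1)
--                 j += i
--         i += 1
--
--     # 计算结果
--     result = 0
--     i = 1
--     while i * i <= n:
--         if n % i == 0:
--             d1 = i
--             d2 = n // i
--
--             result += phi[d1] * d1
--             if d1 != d2:
--                 result += phi[d2] * d2
--         i += 1
--
--     return (result + 1) * n // 2
-- ===== SOURCE B (Python) =====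
-- def _phi(m):
--     # Euler's totient of a single number by trial division, O(sqrt(m)).
--     r = m
--     p = 2
--     while p * p <= m:
--         if m % p == 0:
--             r -= r // p
--             while m % p == 0:
--                 m //= p
--         p += 1
--     if m > 1:
--         r -= r // m
--     return r
--
--
-- def lcm_sum(n: int) -> int:
--     # No O(n) sieve: enumerate divisor pairs of n and compute each needed
--     # totient directly by trial division -- O(sqrt(n)*d(n)) time, O(1) space.
--     result = 0
--     i = 1
--     while i * i <= n:
--         if n % i == 0:
--             result += _phi(i) * i
--             d = n // i
--             if i != d:
--                 result += _phi(d) * d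
--         i += 1
--     return (result + 1) * n // 2
-- ===== Notes on version B (the rewrite author's own statement) =====
-- stated objective: faster
-- what changed: B drops A's O(n)-space totient sieve over 1..n and instead computes the totient of each divisor on demand by trial-division factorization inside the sqrt(n) divisor-pair loop.
import Mathlib
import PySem

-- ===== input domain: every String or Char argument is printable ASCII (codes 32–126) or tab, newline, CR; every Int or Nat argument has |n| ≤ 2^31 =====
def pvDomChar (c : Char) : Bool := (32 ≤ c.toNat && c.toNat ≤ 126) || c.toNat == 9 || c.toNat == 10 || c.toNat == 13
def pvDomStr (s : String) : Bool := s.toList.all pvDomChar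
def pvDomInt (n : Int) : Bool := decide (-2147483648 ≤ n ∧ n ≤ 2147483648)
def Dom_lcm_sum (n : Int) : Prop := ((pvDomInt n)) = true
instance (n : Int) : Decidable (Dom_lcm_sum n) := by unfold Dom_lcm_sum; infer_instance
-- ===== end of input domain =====

-- B replaces A's O(n)-space totient sieve by an on-demand trial-division totient
-- inside the same sqrt(n) divisor-pair enumeration (objective: faster).

-- ===== PORT A =====

-- inner sieve loop: `j = i; while j <= n: phi[j] = phi[j] // i * (i - 1); j += i`
-- (the `1 ≤ i` conjunct is a totality guard only: Python diverges for step 0, which is never reached)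
def sieveInner (phi : List Int) (i j : Nat) (n : Int) : List Int :=
  if h : 1 ≤ i ∧ (j : Int) ≤ n then
    sieveInner (phi.set j (PySem.Int.floordiv (phi.getD j 0) i * ((i : Int) - 1))) i (j + i) n
  else phi
termination_by (n + 1).toNat - j
decreasing_by omega

-- outer sieve loop: `i = 2; while i <= n: if phi[i] == i: <inner>; i += 1`
def sieveOuter (phi : List Int) (i : Nat) (n : Int) : List Int :=
  if h : (i : Int) ≤ n then
    sieveOuter (if phi.getD i 0 == (i : Int) then sieveInner phi i i n else phi) (i + 1) n
  else phi
termination_by (n + 1).toNat - i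
decreasing_by omega

-- `i = 1; while i*i <= n: if n % i == 0: ...; i += 1`
def divLoopA (phi : List Int) (i : Nat) (n : Int) (result : Int) : Int :=
  if h : (i : Int) * (i : Int) ≤ n then
    divLoopA phi (i + 1) n
      (if PySem.Int.mod n i == 0 then
        let d2 : Int := PySem.Int.floordiv n i
        let r1 := result + phi.getD i 0 * (i : Int)
        if (i : Int) != d2 then r1 + phi.getD d2.toNat 0 * d2 else r1
      else result)
  else result
termination_by (n + 1).toNat - i
decreasing_by
  rcases Nat.eq_zero_or_pos i with h0 | h0
  · subst h0; simp at h; omega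
  · have hii : (i : Int) ≤ (i : Int) * (i : Int) :=
      le_mul_of_one_le_left (by positivity) (by exact_mod_cast h0)
    omega

def lcm_sum (n : Int) : Int :=
  let phi0 := PySem.List.pyRange 0 (n + 1) 1
  let phi := sieveOuter phi0 2 n
  let result := divLoopA phi 1 n 0
  PySem.Int.floordiv ((result + 1) * n) 2

-- ===== PORT B =====

-- `while m % p == 0: m //= p`  (`2 ≤ p ∧ 1 ≤ m` is a totality guard: Python diverges there, never reached)
def stripP (m p : Nat) : Nat :=
  if h : m % p = 0 ∧ 2 ≤ p ∧ 1 ≤ m then stripP (m / p) p else m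
termination_by m
decreasing_by exact Nat.div_lt_self (by omega) (by omega)

-- bound used by phiLoop's termination proof
theorem stripP_le (m p : Nat) : stripP m p ≤ m := by
  fun_induction stripP m p with
  | case1 _ _ ih => exact le_trans ih (Nat.div_le_self _ _)
  | case2 => exact le_refl _

-- `while p*p <= m: if m % p == 0: r -= r // p; <strip>; p += 1` then trailing prime
def phiLoop (m r p : Nat) : Nat :=
  if h : p * p ≤ m then
    if m % p = 0 then phiLoop (stripP m p) (r - r / p) (p + 1)
    else phiLoop m r (p + 1)
  else if 1 < m then r - r / m else r
termination_by m + 1 - p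
decreasing_by
  · have h1 := stripP_le m p
    have h4 : p ≤ p * p := by
      cases p with
      | zero => exact Nat.le_refl 0
      | succ c => exact Nat.le_mul_of_pos_left _ (Nat.succ_pos c)
    omega
  · have h4 : p ≤ p * p := by
      cases p with
      | zero => exact Nat.le_refl 0
      | succ c => exact Nat.le_mul_of_pos_left _ (Nat.succ_pos c)
    omega

-- _phi(m): r = m; p = 2; ...
def phiTD (m : Nat) : Nat := phiLoop m m 2

-- `i = 1; while i*i <= n: ...` (same divisor-pair enumeration, totients on demand)
def divLoopB (i : Nat) (n : Int) (result : Int) : Int :=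
  if h : (i : Int) * (i : Int) ≤ n then
    divLoopB (i + 1) n
      (if PySem.Int.mod n i == 0 then
        let d : Int := PySem.Int.floordiv n i
        let r1 := result + (phiTD i : Int) * (i : Int)
        if (i : Int) != d then r1 + (phiTD d.toNat : Int) * d else r1
      else result)
  else result
termination_by (n + 1).toNat - i
decreasing_by
  rcases Nat.eq_zero_or_pos i with h0 | h0
  · subst h0; simp at h; omega
  · have hii : (i : Int) ≤ (i : Int) * (i : Int) :=
      le_mul_of_one_le_left (by positivity) (by exact_mod_cast h0)
    omega

def lcm_sum_alt (n : Int) : Int :=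
  PySem.Int.floordiv ((divLoopB 1 n 0 + 1) * n) 2

-- ===== PRECONDITION & SPEC =====
def Spec_lcm_sum (n : Int) (out : Int) : Prop := out = lcm_sum_alt n
instance (n : Int) (out : Int) : Decidable (Spec_lcm_sum n out) := by unfold Spec_lcm_sum; infer_instance

-- ===== CLAIM (what is proved, stated in full; the proofs are below) =====
def Claim_equal_lcm_sum : Prop := ∀ (n : Int), Dom_lcm_sum n → Spec_lcm_sum n (lcm_sum n)

-- ===== LEMMAS AND PROOFS =====

-- the common closed form: (m / prod of the primes in S) * prod (p-1) over S
def pphi (S : Finset ℕ) (m : ℕ) : ℕ := m / (∏ p ∈ S, p) * ∏ p ∈ S, (p - 1)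

def phiSpec (m : ℕ) : ℕ := pphi m.primeFactors m

theorem pphi_empty (m : ℕ) : pphi ∅ m = m := by simp [pphi]

theorem prod_subset_dvd (M : ℕ) (S : Finset ℕ) (hS : S ⊆ M.primeFactors) : ∏ p ∈ S, p ∣ M :=
  Finset.prod_primes_dvd M (fun p hp => (Nat.prime_of_mem_primeFactors (hS hp)).prime)
    (fun p hp => Nat.dvd_of_mem_primeFactors (hS hp))

theorem pvDivHelper (M P q u : ℕ) (hP : 0 < P) (hq : 0 < q) (hM : M = P * (q * u)) :
    M / P = q * u ∧ M / (q * P) = u := by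
  subst hM
  refine ⟨Nat.mul_div_cancel_left _ hP, ?_⟩
  rw [show P * (q * u) = q * P * u by ring]
  exact Nat.mul_div_cancel_left _ (by positivity)

-- the one exact-division step both programs take, made explicit
theorem pphi_core (M q : ℕ) (S : Finset ℕ) (hS : S ⊆ M.primeFactors)
    (hq : q ∈ M.primeFactors) (hqS : q ∉ S) :
    ∃ u, pphi S M = q * u ∧ pphi (insert q S) M = u * (q - 1) := by
  have hqp : q.Prime := Nat.prime_of_mem_primeFactors hq
  have hP : ∏ p ∈ S, p ∣ M := prod_subset_dvd M S hS
  have hqP : ¬ q ∣ ∏ p ∈ S, p := by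
    intro hd
    obtain ⟨p, hpS, hqp2⟩ := (hqp.prime.dvd_finset_prod_iff _).mp hd
    have heq : q = p :=
      (Nat.prime_dvd_prime_iff_eq hqp (Nat.prime_of_mem_primeFactors (hS hpS))).mp hqp2
    exact hqS (heq ▸ hpS)
  have hM : (∏ p ∈ S, p) * (M / ∏ p ∈ S, p) = M := Nat.mul_div_cancel' hP
  have hqt : q ∣ M / ∏ p ∈ S, p := by
    refine ((Nat.Prime.coprime_iff_not_dvd hqp).mpr hqP).dvd_of_dvd_mul_left ?_
    rw [hM]; exact Nat.dvd_of_mem_primeFactors hq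
  have hPpos : 0 < ∏ p ∈ S, p :=
    Finset.prod_pos fun p hp => (Nat.prime_of_mem_primeFactors (hS hp)).pos
  have ht : q * ((M / ∏ p ∈ S, p) / q) = M / ∏ p ∈ S, p := Nat.mul_div_cancel' hqt
  have hM' : M = (∏ p ∈ S, p) * (q * ((M / ∏ p ∈ S, p) / q)) := by rw [ht, hM]
  obtain ⟨e1, e2⟩ := pvDivHelper M (∏ p ∈ S, p) q ((M / ∏ p ∈ S, p) / q) hPpos hqp.pos hM'
  refine ⟨(M / ∏ p ∈ S, p) / q * ∏ p ∈ S, (p - 1), ?_, ?_⟩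
  · conv_lhs => rw [pphi, e1]
    ring
  · have hi1 : ∏ p ∈ insert q S, p = q * ∏ p ∈ S, p := Finset.prod_insert hqS
    have hi2 : ∏ p ∈ insert q S, (p - 1) = (q - 1) * ∏ p ∈ S, (p - 1) := Finset.prod_insert hqS
    rw [pphi, hi1, hi2, e2]; ring

theorem pphi_lt (M : ℕ) (S : Finset ℕ) (hS : S ⊆ M.primeFactors) (hne : S.Nonempty)
    (hM : 1 ≤ M) : pphi S M < M := by
  have hP : ∏ p ∈ S, p ∣ M := prod_subset_dvd M S hS
  have hPpos : 0 < ∏ p ∈ S, p :=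
    Finset.prod_pos fun p hp => (Nat.prime_of_mem_primeFactors (hS hp)).pos
  have htpos : 0 < M / ∏ p ∈ S, p := Nat.div_pos (Nat.le_of_dvd (by omega) hP) hPpos
  have hQ : ∏ p ∈ S, (p - 1) < ∏ p ∈ S, p := by
    refine Finset.prod_lt_prod_of_nonempty ?_ ?_ hne
    · intro p hp; have := (Nat.prime_of_mem_primeFactors (hS hp)).two_le; omega
    · intro p hp; have := (Nat.prime_of_mem_primeFactors (hS hp)).two_le; omega
  calc pphi S M = (M / ∏ p ∈ S, p) * ∏ p ∈ S, (p - 1) := rfl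
    _ < (M / ∏ p ∈ S, p) * ∏ p ∈ S, p := (Nat.mul_lt_mul_left htpos).mpr hQ
    _ = M := by rw [Nat.mul_comm]; exact Nat.mul_div_cancel' hP

theorem filter_lt_two_eq_empty (j : ℕ) : j.primeFactors.filter (fun q => q < 2) = ∅ :=
  Finset.filter_eq_empty_iff.mpr fun q hq => by
    have := (Nat.prime_of_mem_primeFactors hq).two_le; omega

-- A's primality test `phi[i] == i`, and B's device of meeting each prime as the
-- least remaining factor, both reduce to this characterisation
theorem pphi_self_iff (i : ℕ) (hi : 2 ≤ i) :
    pphi (i.primeFactors.filter (fun q => q < i)) i = i ↔ i.Prime := by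
  constructor
  · intro h
    by_contra hnp
    have hmem : i.minFac ∈ i.primeFactors :=
      Nat.mem_primeFactors.mpr ⟨Nat.minFac_prime (by omega), Nat.minFac_dvd i, by omega⟩
    have hlt : i.minFac < i := by
      have hle : i.minFac ≤ i := Nat.minFac_le (by omega)
      have hne : i.minFac ≠ i := by
        intro he; exact hnp (he ▸ Nat.minFac_prime (show i ≠ 1 by omega))
      omega
    have hne : (i.primeFactors.filter (fun q => q < i)).Nonempty :=
      ⟨i.minFac, Finset.mem_filter.mpr ⟨hmem, hlt⟩⟩
    have := pphi_lt i _ (Finset.filter_subset _ _) hne (by omega)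
    omega
  · intro hp
    have : i.primeFactors.filter (fun q => q < i) = ∅ := by
      rw [hp.primeFactors]
      refine Finset.filter_eq_empty_iff.mpr ?_
      intro q hq; simp only [Finset.mem_singleton] at hq; omega
    rw [this, pphi_empty]

-- ----- B side: the strip loop removes exactly the factor p -----

theorem strip_spec (p : ℕ) (hp : p.Prime) :
    ∀ m, 1 ≤ m → stripP m p ∣ m ∧ ¬ p ∣ stripP m p ∧
      (∀ q : ℕ, q.Prime → q ≠ p → (q ∣ stripP m p ↔ q ∣ m)) := by
  intro m
  induction m using Nat.strong_induction_on with
  | _ m ih =>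
    intro hm
    rw [stripP]
    split
    · next h =>
      have hdm : p ∣ m := Nat.dvd_of_mod_eq_zero h.1
      have hp2 : 2 ≤ p := hp.two_le
      have hmp1 : 1 ≤ m / p := Nat.div_pos (Nat.le_of_dvd (by omega) hdm) (by omega)
      obtain ⟨ih1, ih2, ih3⟩ := ih (m / p) (Nat.div_lt_self (by omega) (by omega)) hmp1
      have hsplit : p * (m / p) = m := Nat.mul_div_cancel' hdm
      have hdd : m / p ∣ m := Nat.div_dvd_of_dvd hdm
      refine ⟨ih1.trans hdd, ih2, ?_⟩
      intro q hq hqp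
      rw [ih3 q hq hqp]
      constructor
      · intro hd; exact hd.trans hdd
      · intro hd
        refine ((Nat.coprime_primes hq hp).mpr hqp).dvd_of_dvd_mul_left ?_
        rw [hsplit]; exact hd
    · next h =>
      have hnd : ¬ p ∣ m := by
        intro hd
        exact h ⟨Nat.mod_eq_zero_of_dvd hd, hp.two_le, hm⟩
      exact ⟨dvd_refl m, hnd, fun q _ _ => Iff.rfl⟩

theorem strip_primeFactors (m p : ℕ) (hp : p.Prime) (hm : 1 ≤ m) :
    (stripP m p).primeFactors = m.primeFactors.erase p := by
  obtain ⟨h1, h2, h3⟩ := strip_spec p hp m hm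
  have hs0 : stripP m p ≠ 0 := by
    intro h0; rw [h0] at h1; have := Nat.eq_zero_of_zero_dvd h1; omega
  ext q
  simp only [Nat.mem_primeFactors, Finset.mem_erase]
  constructor
  · rintro ⟨hq, hqd, -⟩
    have hqp : q ≠ p := by rintro rfl; exact h2 hqd
    exact ⟨hqp, hq, (h3 q hq hqp).mp hqd, by omega⟩
  · rintro ⟨hqp, hq, hqd, -⟩
    exact ⟨hq, (h3 q hq hqp).mpr hqd, hs0⟩

-- ----- B side: the main trial-division invariant -----

theorem phiLoop_exit (M m r p : ℕ) (hM : 1 ≤ M) (hguard : ¬ p * p ≤ m) (hdvd : m ∣ M)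
    (hfac : m.primeFactors = M.primeFactors.filter (fun q => p ≤ q))
    (hr : r = pphi (M.primeFactors.filter (fun q => q < p)) M) :
    (if 1 < m then r - r / m else r) = phiSpec M := by
  have hmem : ∀ q, q ∈ m.primeFactors ↔ q ∈ M.primeFactors ∧ p ≤ q := by
    intro q; rw [hfac, Finset.mem_filter]
  by_cases h1 : 1 < m
  · -- trailing prime
    have hmp : m.Prime := by
      by_contra hnp
      have hsq := Nat.minFac_sq_le_self (show 0 < m by omega) hnp
      have hmm : m.minFac ∈ m.primeFactors :=
        Nat.mem_primeFactors.mpr ⟨Nat.minFac_prime (by omega), Nat.minFac_dvd m, by omega⟩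
      have hple : p ≤ m.minFac := ((hmem _).mp hmm).2
      have hsq' : m.minFac * m.minFac ≤ m := by rw [pow_two] at hsq; exact hsq
      exact hguard (le_trans (Nat.mul_le_mul hple hple) hsq')
    have hself : m ∈ m.primeFactors := by rw [hmp.primeFactors]; simp
    have hmm : m ∈ M.primeFactors ∧ p ≤ m := (hmem m).mp hself
    have hmS : m ∉ M.primeFactors.filter (fun q => q < p) := by
      simp only [Finset.mem_filter, not_and]; intro _; omega
    obtain ⟨u, hu1, hu2⟩ :=
      pphi_core M m _ (Finset.filter_subset _ _) hmm.1 hmS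
    have hins : insert m (M.primeFactors.filter (fun q => q < p)) = M.primeFactors := by
      ext q
      simp only [Finset.mem_insert, Finset.mem_filter]
      constructor
      · rintro (rfl | ⟨hq, _⟩)
        · exact hmm.1
        · exact hq
      · intro hq
        by_cases hqp : q < p
        · exact Or.inr ⟨hq, hqp⟩
        · have : q ∈ m.primeFactors := (hmem q).mpr ⟨hq, by omega⟩
          rw [hmp.primeFactors] at this
          simp only [Finset.mem_singleton] at this
          exact Or.inl this
    rw [if_pos h1, hr, hu1]
    have hm2 : 2 ≤ m := h1
    have : m * u - (m * u) / m = u * (m - 1) := by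
      rw [Nat.mul_div_cancel_left u (by omega), Nat.mul_comm m u, Nat.mul_sub, Nat.mul_one]
    rw [this, ← hu2, hins]
    rfl
  · -- m = 1: every prime of M was processed
    have hm0 : m ≠ 0 := by
      rintro rfl; rw [Nat.eq_zero_of_zero_dvd hdvd] at hM; omega
    have hm1 : m = 1 := by omega
    have hall : ∀ q ∈ M.primeFactors, q < p := by
      intro q hq
      by_contra hlt
      have : q ∈ m.primeFactors := (hmem q).mpr ⟨hq, by omega⟩
      rw [hm1] at this
      simp at this
    rw [if_neg h1, hr, Finset.filter_true_of_mem hall]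
    rfl

theorem phiLoop_eq (M : ℕ) (hM : 1 ≤ M) :
    ∀ k m r p, m + 1 - p ≤ k → 2 ≤ p → m ∣ M →
      m.primeFactors = M.primeFactors.filter (fun q => p ≤ q) →
      r = pphi (M.primeFactors.filter (fun q => q < p)) M →
      phiLoop m r p = phiSpec M := by
  intro k
  induction k with
  | zero =>
    intro m r p hk hp hdvd hfac hr
    have hguard : ¬ p * p ≤ m := by
      have h4 : p ≤ p * p := Nat.le_mul_of_pos_left _ (by omega)
      omega
    rw [phiLoop, dif_neg hguard]
    exact phiLoop_exit M m r p hM hguard hdvd hfac hr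
  | succ k ih =>
    intro m r p hk hp hdvd hfac hr
    rw [phiLoop]
    split
    · next hguard =>
      have hpm : p ≤ m := by
        have h4 : p ≤ p * p := Nat.le_mul_of_pos_left _ (by omega)
        omega
      split
      · next hmod =>
        -- p divides m: p is prime (the least remaining factor), strip it
        have hdm : p ∣ m := Nat.dvd_of_mod_eq_zero hmod
        have hm4 : 4 ≤ m := by nlinarith [hguard]
        have hpp : p.Prime := by
          have h2 : p.minFac ∣ m := (Nat.minFac_dvd p).trans hdm
          have hqmem : p.minFac ∈ m.primeFactors :=
            Nat.mem_primeFactors.mpr ⟨Nat.minFac_prime (by omega), h2, by omega⟩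
          have hge : p ≤ p.minFac := by
            have := (Finset.ext_iff.mp hfac _).mp hqmem
            exact (Finset.mem_filter.mp this).2
          have hle : p.minFac ≤ p := Nat.minFac_le (by omega)
          have heq : p.minFac = p := le_antisymm hle hge
          exact heq ▸ Nat.minFac_prime (by omega)
        have hpM : p ∈ M.primeFactors := by
          have : p ∈ m.primeFactors := Nat.mem_primeFactors.mpr ⟨hpp, hdm, by omega⟩
          exact (Finset.mem_filter.mp ((Finset.ext_iff.mp hfac _).mp this)).1
        have hpS : p ∉ M.primeFactors.filter (fun q => q < p) := by
          simp only [Finset.mem_filter, not_and]; intro _; omega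
        obtain ⟨u, hu1, hu2⟩ :=
          pphi_core M p _ (Finset.filter_subset _ _) hpM hpS
        refine ih (stripP m p) (r - r / p) (p + 1) ?_ (by omega) ?_ ?_ ?_
        · have := stripP_le m p; omega
        · exact ((strip_spec p hpp m (by omega)).1).trans hdvd
        · rw [strip_primeFactors m p hpp (by omega), hfac]
          ext q
          simp only [Finset.mem_erase, Finset.mem_filter]
          constructor
          · rintro ⟨hqp, hq, hge⟩; exact ⟨hq, by omega⟩
          · rintro ⟨hq, hge⟩; exact ⟨by omega, hq, by omega⟩
        · have hstep : r - r / p = pphi (insert p (M.primeFactors.filter (fun q => q < p))) M := by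
            rw [hr, hu1, Nat.mul_div_cancel_left u hpp.pos, hu2, Nat.mul_sub, Nat.mul_one,
              Nat.mul_comm p u]
          rw [hstep]
          congr 1
          ext q
          simp only [Finset.mem_insert, Finset.mem_filter]
          constructor
          · rintro (rfl | ⟨hq, hlt⟩)
            · exact ⟨hpM, by omega⟩
            · exact ⟨hq, by omega⟩
          · rintro ⟨hq, hlt⟩
            by_cases hqp : q = p
            · exact Or.inl hqp
            · exact Or.inr ⟨hq, by omega⟩
      · next hmod =>
        -- p does not divide m: nothing of M survives at p either
        have hpM : p ∉ M.primeFactors := by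
          intro hpm'
          have : p ∈ m.primeFactors := by
            rw [hfac]; exact Finset.mem_filter.mpr ⟨hpm', le_refl p⟩
          exact hmod (Nat.mod_eq_zero_of_dvd (Nat.dvd_of_mem_primeFactors this))
        refine ih m r (p + 1) (by omega) (by omega) hdvd ?_ ?_
        · rw [hfac]
          ext q
          simp only [Finset.mem_filter]
          constructor
          · rintro ⟨hq, hge⟩
            have : q ≠ p := by rintro rfl; exact hpM hq
            exact ⟨hq, by omega⟩
          · rintro ⟨hq, hge⟩; exact ⟨hq, by omega⟩
        · rw [hr]
          congr 1
          ext q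
          simp only [Finset.mem_filter]
          constructor
          · rintro ⟨hq, hlt⟩; exact ⟨hq, by omega⟩
          · rintro ⟨hq, hlt⟩
            have : q ≠ p := by rintro rfl; exact hpM hq
            exact ⟨hq, by omega⟩
    · next hguard =>
      exact phiLoop_exit M m r p hM hguard hdvd hfac hr

theorem phiTD_eq (m : ℕ) (hm : 1 ≤ m) : phiTD m = phiSpec m := by
  rw [phiTD]
  refine phiLoop_eq m hm m m m 2 (by omega) (by omega) (dvd_refl m) ?_ ?_
  · exact (Finset.filter_true_of_mem fun q hq =>
      (Nat.prime_of_mem_primeFactors hq).two_le).symm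
  · rw [filter_lt_two_eq_empty, pphi_empty]

-- ----- A side: what the inner sieve pass does to each cell -----

theorem sieveInner_getD (n : Int) (i : ℕ) (hi : 1 ≤ i) :
    ∀ k (j0 : ℕ) (phi : List Int), (n + 1).toNat - j0 ≤ k → i ∣ j0 →
      ∀ j : ℕ, (sieveInner phi i j0 n).getD j 0 =
        if i ∣ j ∧ j0 ≤ j ∧ (j : Int) ≤ n
        then PySem.Int.floordiv (phi.getD j 0) i * ((i : Int) - 1)
        else phi.getD j 0 := by
  intro k
  induction k with
  | zero =>
    intro j0 phi hk hdvd j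
    have hguard : ¬ (1 ≤ i ∧ (j0 : Int) ≤ n) := by rintro ⟨-, hle⟩; omega
    rw [sieveInner, dif_neg hguard]
    rw [if_neg]
    rintro ⟨-, h1, h2⟩; omega
  | succ k ih =>
    intro j0 phi hk hdvd j
    by_cases hguard : (j0 : Int) ≤ n
    · rw [sieveInner, dif_pos ⟨hi, hguard⟩]
      rw [ih (j0 + i) _ (by omega) (hdvd.add (dvd_refl i)) j]
      by_cases hj : j = j0
      · subst hj
        rw [if_neg (by rintro ⟨-, h1, -⟩; omega), if_pos ⟨hdvd, le_refl _, hguard⟩]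
        by_cases hlen : j < phi.length
        · simp [hlen]
        · have h0 : phi.getD j 0 = 0 := by
            rw [List.getD_eq_getElem?_getD, List.getElem?_eq_none (by omega)]; rfl
          have h0' : (phi.set j (PySem.Int.floordiv (phi.getD j 0) i * ((i : Int) - 1))).getD j 0
              = 0 := by
            rw [List.getD_eq_getElem?_getD, List.getElem?_eq_none (by simp; omega)]; rfl
          rw [h0', h0, PySem.Int.floordiv_eq_ediv_of_pos (by exact_mod_cast hi), Int.zero_ediv,
            zero_mul]
      · have hset : ∀ v : Int, (phi.set j0 v).getD j 0 = phi.getD j 0 := by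
          intro v
          rw [List.getD_eq_getElem?_getD, List.getElem?_set_ne (by omega),
            ← List.getD_eq_getElem?_getD]
        rw [hset]
        by_cases hd2 : i ∣ j ∧ j0 ≤ j ∧ (j : Int) ≤ n
        · have hstep : j0 + i ≤ j := by
            obtain ⟨hdj, hge, -⟩ := hd2
            have hd3 : i ∣ j - j0 := Nat.dvd_sub hdj hdvd
            have := Nat.le_of_dvd (by omega) hd3
            omega
          rw [if_pos ⟨hd2.1, hstep, hd2.2.2⟩, if_pos hd2]
        · rw [if_neg (fun hc => hd2 ⟨hc.1, by omega, hc.2.2⟩), if_neg hd2]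
    · rw [sieveInner, dif_neg (fun hc => hguard hc.2)]
      rw [if_neg]
      rintro ⟨-, h1, h2⟩
      omega

-- ----- A side: the outer sieve establishes phiSpec at every cell ≤ n -----

theorem sieveOuter_getD (n : Int) :
    ∀ k (i : ℕ) (phi : List Int), (n + 1).toNat - i ≤ k → 2 ≤ i →
      (∀ j : ℕ, j ≤ n.toNat →
        phi.getD j 0 = (pphi (j.primeFactors.filter (fun q => q < i)) j : Int)) →
      ∀ j : ℕ, j ≤ n.toNat → (sieveOuter phi i n).getD j 0 = (phiSpec j : Int) := by
  intro k
  induction k with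
  | zero =>
    intro i phi hk hi hinv j hj
    have hguard : ¬ (i : Int) ≤ n := by omega
    rw [sieveOuter, dif_neg hguard, hinv j hj]
    have : j.primeFactors.filter (fun q => q < i) = j.primeFactors :=
      Finset.filter_true_of_mem fun q hq => by
        have hqj : q ≤ j := Nat.le_of_mem_primeFactors hq
        omega
    rw [this]; rfl
  | succ k ih =>
    intro i phi hk hi hinv j hj
    by_cases hguard : (i : Int) ≤ n
    · rw [sieveOuter, dif_pos hguard]
      have hin : i ≤ n.toNat := by omega
      by_cases hip : i.Prime
      · -- A's test fires exactly on primes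
        have hcond : (phi.getD i 0 == (i : Int)) = true := by
          rw [hinv i hin, (pphi_self_iff i hi).mpr hip]
          exact beq_self_eq_true _
        rw [hcond, if_pos rfl]
        refine ih (i + 1) (sieveInner phi i i n) (by omega) (by omega) ?_ j hj
        intro j' hj'
        rw [sieveInner_getD n i (by omega) ((n + 1).toNat) i phi (by omega) (dvd_refl i) j']
        by_cases hc : i ∣ j' ∧ i ≤ j' ∧ (j' : Int) ≤ n
        · obtain ⟨hd, hge, hle⟩ := hc
          have hj0 : j' ≠ 0 := by omega
          have hiMem : i ∈ j'.primeFactors := Nat.mem_primeFactors.mpr ⟨hip, hd, hj0⟩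
          have hiS : i ∉ j'.primeFactors.filter (fun q => q < i) := by
            simp only [Finset.mem_filter, not_and]; intro _; omega
          obtain ⟨u, hu1, hu2⟩ := pphi_core j' i _ (Finset.filter_subset _ _) hiMem hiS
          rw [if_pos ⟨hd, hge, hle⟩, hinv j' hj', hu1]
          have hins : insert i (j'.primeFactors.filter (fun q => q < i))
              = j'.primeFactors.filter (fun q => q < i + 1) := by
            ext q
            simp only [Finset.mem_insert, Finset.mem_filter]
            constructor
            · rintro (rfl | ⟨hq, hlt⟩)
              · exact ⟨hiMem, by omega⟩
              · exact ⟨hq, by omega⟩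
            · rintro ⟨hq, hlt⟩
              by_cases hqi : q = i
              · exact Or.inl hqi
              · exact Or.inr ⟨hq, by omega⟩
          have hval : pphi (j'.primeFactors.filter (fun q => q < i + 1)) j' = u * (i - 1) := by
            rw [← hins]; exact hu2
          rw [hval, PySem.Int.floordiv_natCast, Nat.mul_div_cancel_left u hip.pos]
          push_cast [Nat.cast_sub (by omega : 1 ≤ i)]
          ring
        · rw [if_neg hc, hinv j' hj']
          have : j'.primeFactors.filter (fun q => q < i + 1)
              = j'.primeFactors.filter (fun q => q < i) := by
            ext q
            simp only [Finset.mem_filter]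
            constructor
            · rintro ⟨hq, hlt⟩
              refine ⟨hq, ?_⟩
              by_cases hqi : q = i
              · subst hqi
                exfalso
                have hd : q ∣ j' := Nat.dvd_of_mem_primeFactors hq
                have hj0 : j' ≠ 0 := (Nat.mem_primeFactors.mp hq).2.2
                have : q ≤ j' := Nat.le_of_dvd (by omega) hd
                exact hc ⟨hd, this, by omega⟩
              · omega
            · rintro ⟨hq, hlt⟩; exact ⟨hq, by omega⟩
          rw [this]
      · -- composite i: A's test cannot fire
        have hcond : (phi.getD i 0 == (i : Int)) = false := by
          rw [hinv i hin]
          have hne : pphi (i.primeFactors.filter (fun q => q < i)) i ≠ i :=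
            fun he => hip ((pphi_self_iff i hi).mp he)
          exact beq_eq_false_iff_ne.mpr (by exact_mod_cast hne)
        rw [hcond, if_neg (by simp)]
        refine ih (i + 1) phi (by omega) (by omega) ?_ j hj
        intro j' hj'
        rw [hinv j' hj']
        have : j'.primeFactors.filter (fun q => q < i + 1)
            = j'.primeFactors.filter (fun q => q < i) := by
          ext q
          simp only [Finset.mem_filter]
          constructor
          · rintro ⟨hq, hlt⟩
            have : q ≠ i := fun he => hip (he ▸ Nat.prime_of_mem_primeFactors hq)
            exact ⟨hq, by omega⟩
          · rintro ⟨hq, hlt⟩; exact ⟨hq, by omega⟩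
        rw [this]
    · rw [sieveOuter, dif_neg hguard, hinv j hj]
      have : j.primeFactors.filter (fun q => q < i) = j.primeFactors :=
        Finset.filter_true_of_mem fun q hq => by
          have hqj : q ≤ j := Nat.le_of_mem_primeFactors hq
          omega
      rw [this]; rfl

theorem sieve_getD (n : Int) (hn : 1 ≤ n) (j : ℕ) (hj : j ≤ n.toNat) :
    (sieveOuter (PySem.List.pyRange 0 (n + 1) 1) 2 n).getD j 0 = (phiSpec j : Int) := by
  refine sieveOuter_getD n ((n + 1).toNat) 2 _ (by omega) (le_refl 2) ?_ j hj
  intro j' hj'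
  have hinit : (PySem.List.pyRange 0 (n + 1) 1).getD j' 0 = (j' : Int) := by
    rw [PySem.List.pyRange_one]
    simp only [List.getD_eq_getElem?_getD, List.getElem?_map]
    rw [List.getElem?_range (by omega)]
    simp
  rw [hinit, filter_lt_two_eq_empty, pphi_empty]

theorem divLoop_congr (phi : List Int) (n : Int) (hn : 1 ≤ n)
    (hphi : ∀ j : ℕ, 1 ≤ j → j ≤ n.toNat → phi.getD j 0 = (phiSpec j : Int)) :
    ∀ i acc, 1 ≤ i → divLoopA phi i n acc = divLoopB i n acc := by
  have main : ∀ k i acc, (n + 1).toNat - i ≤ k → 1 ≤ i →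
      divLoopA phi i n acc = divLoopB i n acc := by
    intro k
    induction k with
    | zero =>
      intro i acc hk hi
      have hguard : ¬ ((i : Int) * (i : Int) ≤ n) := by
        intro hc
        have h4 : (i : Int) ≤ (i : Int) * (i : Int) :=
          le_mul_of_one_le_left (by positivity) (by exact_mod_cast hi)
        omega
      rw [divLoopA.eq_def, divLoopB.eq_def, dif_neg hguard, dif_neg hguard]
    | succ k ih =>
      intro i acc hk hi
      by_cases hguard : (i : Int) * (i : Int) ≤ n
      · have h4 : (i : Int) ≤ (i : Int) * (i : Int) :=
          le_mul_of_one_le_left (by positivity) (by exact_mod_cast hi)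
        have hin : i ≤ n.toNat := by omega
        have e1 : phi.getD i 0 = ((phiTD i : ℕ) : Int) := by
          rw [hphi i hi hin, phiTD_eq i hi]
        have hd2c : PySem.Int.floordiv n i = ((n.toNat / i : ℕ) : Int) := by
          rw [show n = ((n.toNat : ℕ) : Int) by omega]
          exact PySem.Int.floordiv_natCast _ _
        have hd2pos : 1 ≤ n.toNat / i := Nat.div_pos hin (by omega)
        have hd2le : n.toNat / i ≤ n.toNat := Nat.div_le_self _ _
        have e2 : phi.getD (PySem.Int.floordiv n i).toNat 0
            = ((phiTD (PySem.Int.floordiv n i).toNat : ℕ) : Int) := by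
          rw [hd2c, Int.toNat_natCast, hphi _ hd2pos hd2le, phiTD_eq _ hd2pos]
        rw [divLoopA.eq_def, divLoopB.eq_def, dif_pos hguard, dif_pos hguard]
        refine Eq.trans (congrArg (divLoopA phi (i + 1) n) ?_) (ih (i + 1) _ (by omega) (by omega))
        simp only [e1, e2]
      · rw [divLoopA.eq_def, divLoopB.eq_def, dif_neg hguard, dif_neg hguard]
  intro i acc hi
  exact main ((n + 1).toNat) i acc (by omega) hi

-- ===== VERDICT (by name: the statement is the Claim_ definition above) =====
theorem lcm_sum_spec : Claim_equal_lcm_sum := by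
  intro n _
  unfold Spec_lcm_sum
  simp only [lcm_sum, lcm_sum_alt]
  by_cases hn : 1 ≤ n
  · have := divLoop_congr (sieveOuter (PySem.List.pyRange 0 (n + 1) 1) 2 n) n hn
      (fun j hj1 hj2 => sieve_getD n hn j hj2) 1 0 (le_refl 1)
    simp only [this]
  · rw [divLoopA.eq_def, divLoopB.eq_def]
    simp [hn]
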